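-- pv_equiv track=rewrite | github.com/14857/Baekjoon | 프로그래머스/0/120812. 최빈값 구하기/최빈값 구하기.py | solution
-- ===== SOURCE A (Python) =====
-- def solution(array):
--     answer = 0
--     dic = {}
--
--     for i in array:
--         if i not in dic:
--             dic[i] = 1
--         else:
--             dic[i] += 1
--
--     answer = max(dic, key = dic.get)
--
--     max_value = max(dic.values())
--     max_keys = [k for k, v in dic.items() if v == max_value]
--
--     if(len(max_keys) >= 2):
--         answer = -1
--     else:
--         answer =  max_keys[0]
--
--
--     return answer
-- ===== SOURCE B (Python) =====
-- def solution(array):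
--     s = sorted(array)
--     n = len(s)
--     runs = []
--     i = 0
--     while i < n:
--         j = i
--         while j < n and s[j] == s[i]:
--             j += 1
--         runs.append((s[i], j - i))
--         i = j
--     max_len = max(c for _, c in runs)
--     winners = [v for v, c in runs if c == max_len]
--     return winners[0] if len(winners) == 1 else -1
-- ===== Notes on version B (the rewrite author's own statement) =====
-- stated objective: alternative
-- what changed: B sorts the array and scans it once grouping equal adjacent elements into (value, run-length) runs, instead of A's frequency dictionary plus filter over dict items.
-- outside the precondition, e.g. on solution([]): A raises ValueError, B raises ValueError
import Mathlib
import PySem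

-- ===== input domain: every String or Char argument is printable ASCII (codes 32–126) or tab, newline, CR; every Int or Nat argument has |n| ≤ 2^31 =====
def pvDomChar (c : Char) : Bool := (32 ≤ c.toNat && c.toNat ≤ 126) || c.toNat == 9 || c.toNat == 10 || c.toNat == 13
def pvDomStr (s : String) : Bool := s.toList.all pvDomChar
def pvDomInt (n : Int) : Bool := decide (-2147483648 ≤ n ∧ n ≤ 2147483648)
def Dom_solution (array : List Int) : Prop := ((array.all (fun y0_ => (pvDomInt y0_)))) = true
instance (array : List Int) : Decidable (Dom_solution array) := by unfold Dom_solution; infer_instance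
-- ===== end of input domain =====

-- B replaces A's frequency-dict + filter with sort-then-group-runs; objective: alternative algorithm, equal on all nonempty inputs.


-- ===== PORT A =====
def solution (array : List Int) : Int :=
  let dic := array.foldl
    (fun d i => if d.contains i then d.modify i 0 (· + 1) else d.insert i 1)
    (PySem.Dict.empty : PySem.Dict Int Int)
  -- answer = max(dic, key=dic.get): overwritten below; computed only for its (excluded) empty-dict raise
  let _answer := PySem.List.max? dic.keys (fun k => dic.getD k 0)
  match PySem.List.max? dic.values (fun v => v) with
  | none => 0   -- max of empty values: Python raises ValueError; excluded by Pre_solution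
  | some maxValue =>
    let maxKeys := (dic.items.filter (fun p => p.2 == maxValue)).map (fun p => p.1)
    if 2 ≤ maxKeys.length then -1
    else PySem.List.pyGetD maxKeys 0 0   -- max_keys[0]; nonempty under Pre_solution

-- ===== PORT B =====
-- the inner while loops of Source B: take the run of elements equal to the head, recurse on the rest
def pvRuns : List Int → List (Int × Int)
  | [] => []
  | x :: xs =>
      (x, 1 + ((xs.takeWhile (· == x)).length : Int)) :: pvRuns (xs.dropWhile (· == x))
  termination_by l => l.length
  decreasing_by simpa using Nat.lt_succ_of_le (List.length_dropWhile_le _ _)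

def solution_alt (array : List Int) : Int :=
  let runs := pvRuns (PySem.List.sorted array (fun x => x) false)
  match PySem.List.max? (runs.map (fun p => p.2)) (fun c => c) with
  | none => 0   -- max of empty generator: Python raises ValueError; excluded by Pre_solution
  | some maxLen =>
    let winners := (runs.filter (fun p => p.2 == maxLen)).map (fun p => p.1)
    if winners.length = 1 then PySem.List.pyGetD winners 0 0 else -1

-- ===== PRECONDITION & SPEC =====
-- Pre_ excludes only the empty list, on which both A and B raise ValueError (max of an empty sequence).
def Pre_solution (array : List Int) : Prop := array ≠ []
instance (array : List Int) : Decidable (Pre_solution array) := by unfold Pre_solution; infer_instance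
def pvWitness_solution : List Int := [1, 2, 2]

def Spec_solution (array : List Int) (out : Int) : Prop := out = solution_alt array
instance (array : List Int) (out : Int) : Decidable (Spec_solution array out) := by unfold Spec_solution; infer_instance

-- ===== CLAIM (what is proved, stated in full; the proofs are below) =====
def Claim_equal_solution : Prop := ∀ (array : List Int), Dom_solution array → Pre_solution array → Spec_solution array (solution array)

-- ===== LEMMAS AND PROOFS =====

-- helper: A's insert-or-increment step is exactly the counter step
lemma pvStepEq (d : PySem.Dict Int Int) (i : Int) :
    (if d.contains i then d.modify i 0 (· + 1) else d.insert i 1) = d.modify i 0 (· + 1) := by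
  by_cases h : d.contains i = true
  · simp [h]
  · simp only [Bool.not_eq_true] at h
    simp [h, PySem.Dict.insert, PySem.Dict.modify, PySem.Dict.getD_of_not_contains (h := h)]

lemma pvDicEq (array : List Int) :
    array.foldl (fun d i => if d.contains i then d.modify i 0 (· + 1) else d.insert i 1)
      PySem.Dict.empty = PySem.Dict.counter array := by
  rw [PySem.Dict.counter_eq_foldl]
  congr 1
  funext d i
  exact pvStepEq d i

-- dropping a run of copies of x from the front does not change the set, given x heads the list
lemma pvDiscardOfList (x : Int) (r : List Int) (hr : x ∉ r) :
    PySem.Set.discard (PySem.Set.ofList r) x = PySem.Set.ofList r := by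
  have h : ∀ y ∈ PySem.Set.ofList r, (!(y == x)) = true := by
    intro y hy
    have : y ∈ r := (PySem.Set.mem_ofList _ _).mp hy
    simp
    rintro rfl; exact hr this
  simp [PySem.Set.discard, List.filter_eq_self.mpr h]

lemma pvOfListBlock (x : Int) (t r : List Int) (ht : ∀ y ∈ t, y = x) (hr : x ∉ r) :
    PySem.Set.ofList (x :: (t ++ r)) = x :: PySem.Set.ofList r := by
  induction t with
  | nil => simp [PySem.Set.ofList_cons, pvDiscardOfList x r hr]
  | cons y t' ih =>
    have hy : y = x := ht y (by simp)
    rw [hy]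
    have ht' : ∀ z ∈ t', z = x := fun z hz => ht z (by simp [hz])
    have ih' := ih ht'
    rw [PySem.Set.ofList_cons] at ih'
    have key : (PySem.Set.ofList (t' ++ r)).discard x = PySem.Set.ofList r := by
      injection ih'
    rw [List.cons_append, PySem.Set.ofList_cons, PySem.Set.ofList_cons]
    have hdd : PySem.Set.discard (x :: (PySem.Set.ofList (t' ++ r)).discard x) x
        = PySem.Set.discard ((PySem.Set.ofList (t' ++ r)).discard x) x := by
      simp [PySem.Set.discard]
    rw [hdd, key, pvDiscardOfList x r hr]

lemma pvRunsSpec : ∀ (s : List Int), s.Pairwise (· ≤ ·) →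
    pvRuns s = (PySem.Set.ofList s).map (fun v => (v, (s.count v : Int))) := by
  intro s
  induction s using pvRuns.induct with
  | case1 => intro _; simp [pvRuns]
  | case2 x xs ih =>
    intro h
    obtain ⟨hle, hxs⟩ := List.pairwise_cons.mp h
    set t := xs.takeWhile (· == x) with htdef
    set r := xs.dropWhile (· == x) with hrdef
    have htr : t ++ r = xs := List.takeWhile_append_dropWhile
    have ht : ∀ y ∈ t, y = x := by
      intro y hy
      have := List.mem_takeWhile_imp hy
      simpa using this
    have hrpair : r.Pairwise (· ≤ ·) := hxs.sublist (List.dropWhile_sublist _)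
    have hxr : ∀ y ∈ r, x < y := by
      intro y hy
      cases hr : r with
      | nil => rw [hr] at hy; simp at hy
      | cons a r' =>
        have hax : (a == x) = false := by
          have := List.head?_dropWhile_not (fun z => z == x) xs
          rw [← hrdef, hr] at this
          simpa using this
        have haxs : a ∈ xs := (List.dropWhile_sublist _).subset (by rw [← hrdef, hr]; simp)
        have hxa : x < a := lt_of_le_of_ne (hle a haxs) (by simpa using Ne.symm (by simpa using hax))
        rw [hr] at hy
        rcases List.mem_cons.mp hy with rfl | hy'
        · exact hxa
        · have : a ≤ y := (List.pairwise_cons.mp (by rw [hr] at hrpair; exact hrpair)).1 y hy'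
          exact lt_of_lt_of_le hxa this
    have hxnr : x ∉ r := fun hx => lt_irrefl x (hxr x hx)
    have hset : PySem.Set.ofList (x :: xs) = x :: PySem.Set.ofList r := by
      rw [← htr]; exact pvOfListBlock x t r ht hxnr
    have hcx : (x :: xs).count x = 1 + t.length := by
      rw [← htr, List.count_cons_self, List.count_append]
      rw [List.count_eq_length.mpr (fun b hb => (ht b hb).symm),
          List.count_eq_zero.mpr hxnr]
      omega
    have hcv : ∀ v ∈ r, (x :: xs).count v = r.count v := by
      intro v hv
      have hvx : v ≠ x := fun hvx => hxnr (hvx ▸ hv)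
      rw [← htr, List.count_cons_of_ne hvx.symm, List.count_append,
          List.count_eq_zero.mpr (fun hvt => hvx (ht v hvt))]
      omega
    rw [pvRuns, hset, List.map_cons, ← htdef, ← hrdef, ih hrpair]
    refine congrArg₂ _ (by rw [hcx]; push_cast; ring) ?_
    refine List.map_congr_left (fun v hv => ?_)
    have : v ∈ r := (PySem.Set.mem_ofList _ _).mp hv
    rw [hcv v this]

lemma pvMaxPerm (l₁ l₂ : List Int) (hp : l₁.Perm l₂) :
    PySem.List.max? l₁ (fun v => v) = PySem.List.max? l₂ (fun v => v) := by
  cases h1 : PySem.List.max? l₁ (fun v => v) with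
  | none =>
    have : l₁ = [] := (PySem.List.max?_eq_none_iff _ _).mp h1
    subst this
    have : l₂ = [] := hp.nil_eq.symm
    subst this
    exact ((PySem.List.max?_eq_none_iff _ _).mpr rfl).symm
  | some m1 =>
    cases h2 : PySem.List.max? l₂ (fun v => v) with
    | none =>
      have : l₂ = [] := (PySem.List.max?_eq_none_iff _ _).mp h2
      subst this
      have : l₁ = [] := hp.eq_nil
      subst this
      simp [PySem.List.max?] at h1
    | some m2 =>
      have hm1 : m1 ∈ l₁ := PySem.List.max?_mem h1
      have hm2 : m2 ∈ l₂ := PySem.List.max?_mem h2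
      have h12 : m1 ≤ m2 := PySem.List.max?_isMax h2 m1 (hp.mem_iff.mp hm1)
      have h21 : m2 ≤ m1 := PySem.List.max?_isMax h1 m2 (hp.mem_iff.mpr hm2)
      rw [le_antisymm h12 h21]

-- ===== VERDICT (by name: the statement is the Claim_ definition above) =====
theorem solution_spec : Claim_equal_solution := by
  unfold Claim_equal_solution Spec_solution Pre_solution
  intro array _ hne
  have hsorted := PySem.List.sorted_perm array (fun x : Int => x) false
  have hpair : (PySem.List.sorted array (fun x : Int => x) false).Pairwise (· ≤ ·) := by
    simpa using PySem.List.sorted_pairwise array (fun x : Int => x)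
  have hruns : pvRuns (PySem.List.sorted array (fun x : Int => x) false)
      = (PySem.Set.ofList (PySem.List.sorted array (fun x : Int => x) false)).map
          (fun v => (v, (array.count v : Int))) := by
    rw [pvRunsSpec _ hpair]
    exact List.map_congr_left (fun v _ => by rw [hsorted.count_eq])
  have hperm : (PySem.Set.ofList array).Perm
      (PySem.Set.ofList (PySem.List.sorted array (fun x : Int => x) false)) := by
    refine (List.perm_ext_iff_of_nodup (PySem.Set.nodup_ofList _) (PySem.Set.nodup_ofList _)).mpr ?_
    intro a
    simp [PySem.Set.mem_ofList, PySem.List.mem_sorted]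
  have hvalsA : (PySem.Dict.counter array).values
      = (PySem.Set.ofList array).map (fun k => (array.count k : Int)) := by
    simp [PySem.Dict.values, PySem.Dict.items_counter, List.map_map, Function.comp]
  simp only [solution, solution_alt]
  rw [pvDicEq array, hvalsA, hruns, List.map_map]
  have hmapB : ((fun p : Int × Int => p.2) ∘ fun v => (v, (array.count v : Int)))
      = fun k => (array.count k : Int) := rfl
  rw [hmapB]
  have hmax := pvMaxPerm _ _ (hperm.map (fun k => (array.count k : Int)))
  rw [← hmax]
  cases hm : PySem.List.max? ((PySem.Set.ofList array).map fun k => (array.count k : Int))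
      (fun v => v) with
  | none => rfl
  | some m =>
    rw [PySem.Dict.items_counter]
    dsimp only
    rw [List.filter_map, List.filter_map, List.map_map, List.map_map]
    have hfst : ((fun p : Int × Int => p.1) ∘ fun v => (v, (array.count v : Int)))
        = fun k : Int => k := rfl
    have hpred : ((fun p : Int × Int => p.2 == m) ∘ fun v => (v, (array.count v : Int)))
        = fun k : Int => ((array.count k : Int) == m) := rfl
    rw [hfst, hpred, List.map_id', List.map_id']
    have hwperm : ((PySem.Set.ofList array).filter
          (fun k : Int => ((array.count k : Int) == m))).Perm
        ((PySem.Set.ofList (PySem.List.sorted array (fun x : Int => x) false)).filter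
          (fun k : Int => ((array.count k : Int) == m))) := hperm.filter _
    have hmem : m ∈ (PySem.Set.ofList array).map (fun k => (array.count k : Int)) :=
      PySem.List.max?_mem hm
    obtain ⟨k, hk, hck⟩ := List.mem_map.mp hmem
    have hkf : k ∈ (PySem.Set.ofList array).filter
        (fun k : Int => ((array.count k : Int) == m)) :=
      List.mem_filter.mpr ⟨hk, by simp [hck]⟩
    have hlen := hwperm.length_eq
    cases hA : (PySem.Set.ofList array).filter
        (fun k : Int => ((array.count k : Int) == m)) with
    | nil => rw [hA] at hkf; simp at hkf
    | cons a l =>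
      cases l with
      | nil =>
        have hB : (PySem.Set.ofList (PySem.List.sorted array (fun x : Int => x) false)).filter
            (fun k : Int => ((array.count k : Int) == m)) = [a] :=
          List.perm_singleton.mp (hA ▸ hwperm).symm
        rw [hB]
        simp [PySem.List.pyGetD_zero_cons]
      | cons b l' =>
        rw [hA] at hlen
        have h2 : 2 ≤ (a :: b :: l').length := by simp
        rw [if_pos h2, if_neg (by rw [← hlen]; simp)]
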